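-- pv_equiv track=rewrite | github.com/jonasRower/Dekoding-JAVA | All Data/algorithm Python/mainProgram/Metody.py | vratIndexNejmensihoRozdilZRadku
-- ===== SOURCE A (Python) =====
-- def vratIndexNejmensihoRozdilZRadku(radekRozdilu, max):
--
--     nejmensiRozdil = max
--     index = 0
--
--     for i in range(0, len(radekRozdilu)):
--         rozdil = radekRozdilu[i]
--         if(rozdil != False):
--             if(rozdil < nejmensiRozdil):
--                 nejmensiRozdil = rozdil
--                 index = i
--
--     return(index)
-- ===== SOURCE B (Python) =====
-- def vratIndexNejmensihoRozdilZRadku(radekRozdilu, max):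
--     candidates = [(radekRozdilu[i], i) for i in range(len(radekRozdilu))
--                   if radekRozdilu[i] != False and radekRozdilu[i] < max]
--     if not candidates:
--         return 0
--     return min(candidates, key=lambda t: t[0])[1]
-- ===== Notes on version B (the rewrite author's own statement) =====
-- stated objective: simpler
-- what changed: Replaces the running-min scan with mutable threshold state by a select-then-reduce decomposition: build the filtered candidate (value, index) list once, then take min() by value (first minimum), falling back to 0 when no candidate beats max.
import Mathlib
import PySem

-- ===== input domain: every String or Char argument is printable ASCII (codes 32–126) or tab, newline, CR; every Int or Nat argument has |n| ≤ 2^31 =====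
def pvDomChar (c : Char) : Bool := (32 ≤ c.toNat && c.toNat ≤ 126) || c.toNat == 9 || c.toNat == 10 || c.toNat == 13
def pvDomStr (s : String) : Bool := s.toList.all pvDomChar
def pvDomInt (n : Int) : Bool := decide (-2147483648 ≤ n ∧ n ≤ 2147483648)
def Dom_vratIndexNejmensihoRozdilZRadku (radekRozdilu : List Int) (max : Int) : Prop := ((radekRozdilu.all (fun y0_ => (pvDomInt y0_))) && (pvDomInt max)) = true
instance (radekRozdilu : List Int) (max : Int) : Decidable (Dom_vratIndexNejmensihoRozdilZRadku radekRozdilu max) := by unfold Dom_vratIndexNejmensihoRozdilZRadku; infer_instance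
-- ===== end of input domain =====

-- B replaces A's running-min scan with mutable threshold state by a select-then-reduce decomposition (filter the candidate list, then min by value); no speed claim.

-- ===== PORT A =====
-- Literal port of A: a running-min loop over range(len(radekRozdilu)) with state
-- (nejmensiRozdil, index), started at (max, 0).  Python's 'rozdil != False' on an
-- int rozdil means rozdil != 0.
def vratIndexNejmensihoRozdilZRadku (radekRozdilu : List Int) (max : Int) : Int :=
  ((PySem.List.pyRange 0 (radekRozdilu.length : Int) 1).foldl
    (fun (st : Int × Int) i =>
      let rozdil := PySem.List.pyGetD radekRozdilu i 0
      if rozdil ≠ 0 then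
        if rozdil < st.1 then (rozdil, i) else st
      else st)
    (max, 0)).2

-- ===== PORT B =====
-- Literal port of B: build the candidate list [(value, index)] of nonzero values
-- below max (comprehension over range(len) = filterMap over pyRange), then take
-- min by value (PySem.List.min? = Python min with key: first minimum), else 0.
def vratIndexNejmensihoRozdilZRadku_alt (radekRozdilu : List Int) (max : Int) : Int :=
  let candidates := (PySem.List.pyRange 0 (radekRozdilu.length : Int) 1).filterMap
    (fun i =>
      let v := PySem.List.pyGetD radekRozdilu i 0
      if v ≠ 0 ∧ v < max then some (v, i) else none)
  match PySem.List.min? candidates (fun t => t.1) with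
  | none => 0
  | some t => t.2

-- ===== PRECONDITION & SPEC =====
def Spec_vratIndexNejmensihoRozdilZRadku (radekRozdilu : List Int) (max : Int) (out : Int) : Prop := out = vratIndexNejmensihoRozdilZRadku_alt radekRozdilu max
instance (radekRozdilu : List Int) (max : Int) (out : Int) : Decidable (Spec_vratIndexNejmensihoRozdilZRadku radekRozdilu max out) := by unfold Spec_vratIndexNejmensihoRozdilZRadku; infer_instance

-- ===== CLAIM (what is proved, stated in full; the proofs are below) =====
def Claim_equal_vratIndexNejmensihoRozdilZRadku : Prop := ∀ (radekRozdilu : List Int) (max : Int), Dom_vratIndexNejmensihoRozdilZRadku radekRozdilu max → Spec_vratIndexNejmensihoRozdilZRadku radekRozdilu max (vratIndexNejmensihoRozdilZRadku radekRozdilu max)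

-- ===== LEMMAS AND PROOFS =====

-- A's loop body, over an (index, value) pair.
def pvStepA (st : Int × Int) (p : Int × Int) : Int × Int :=
  if p.2 ≠ 0 then (if p.2 < st.1 then (p.2, p.1) else st) else st

-- B's candidate filter, over an (index, value) pair, with threshold m.
def pvCand (m : Int) (p : Int × Int) : Option (Int × Int) :=
  if p.2 ≠ 0 ∧ p.2 < m then some (p.2, p.1) else none

-- enumerate distributes over a snoc.
lemma pv_enumerate_append_singleton {α : Type} (ys : List α) (x : α) (s : Int) :
    PySem.List.enumerate (ys ++ [x]) s
      = PySem.List.enumerate ys s ++ [(s + (ys.length : Int), x)] := by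
  induction ys generalizing s with
  | nil => simp [PySem.List.enumerate]
  | cons y t ih =>
      simp only [List.cons_append, PySem.List.enumerate, ih, List.length_cons]
      push_cast
      ring_nf

-- Indexing below the old length is unchanged by a snoc.
lemma pv_pyGetD_append (ys : List Int) (x : Int) (i : Int) (h0 : 0 ≤ i)
    (h1 : i < (ys.length : Int)) :
    PySem.List.pyGetD (ys ++ [x]) i 0 = PySem.List.pyGetD ys i 0 := by
  rw [PySem.List.pyGetD_eq_getElem (ys ++ [x]) 0 h0 (by simp; omega),
      PySem.List.pyGetD_eq_getElem ys 0 h0 h1]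
  exact List.getElem_append_left (by omega)

-- Indexing a snoc at the old length gives the new element.
lemma pv_pyGetD_append_length (ys : List Int) (x : Int) :
    PySem.List.pyGetD (ys ++ [x]) (ys.length : Int) 0 = x := by
  rw [PySem.List.pyGetD_eq_getElem (ys ++ [x]) 0 (by positivity) (by simp)]
  simp

-- An index loop that uses both i and xs[i] is the same fold over enumerate(xs).
lemma pv_foldl_pyRange_enumerate {σ : Type} (xs : List Int) (g : σ → Int × Int → σ)
    (init : σ) :
    (PySem.List.pyRange 0 (xs.length : Int) 1).foldl
        (fun st i => g st (i, PySem.List.pyGetD xs i 0)) init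
      = (PySem.List.enumerate xs 0).foldl g init := by
  induction xs using List.reverseRecOn generalizing init with
  | nil => simp [PySem.List.enumerate]
  | append_singleton ys x ih =>
      have hlen : ((ys ++ [x]).length : Int) = (ys.length : Int) + 1 := by
        simp
      rw [hlen, PySem.List.pyRange_one_succ_right (by positivity),
          pv_enumerate_append_singleton]
      simp only [List.foldl_append, List.foldl_cons, List.foldl_nil]
      have hcong : List.foldl (fun st i => g st (i, PySem.List.pyGetD (ys ++ [x]) i 0))
          init (PySem.List.pyRange 0 (ys.length : Int) 1)
          = List.foldl (fun st i => g st (i, PySem.List.pyGetD ys i 0)) init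
              (PySem.List.pyRange 0 (ys.length : Int) 1) := by
        refine PySem.List.foldl_congr_mem _ _ _ init ?_
        intro acc i hi
        rcases (PySem.List.mem_pyRange_one).1 hi with ⟨h0, h1⟩
        rw [pv_pyGetD_append ys x i h0 h1]
      rw [hcong, ih, pv_pyGetD_append_length, zero_add]

-- Same bridge for B's comprehension.
lemma pv_filterMap_pyRange_enumerate {β : Type} (xs : List Int)
    (g : Int × Int → Option β) :
    (PySem.List.pyRange 0 (xs.length : Int) 1).filterMap
        (fun i => g (i, PySem.List.pyGetD xs i 0))
      = (PySem.List.enumerate xs 0).filterMap g := by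
  induction xs using List.reverseRecOn with
  | nil => simp [PySem.List.enumerate]
  | append_singleton ys x ih =>
      have hlen : ((ys ++ [x]).length : Int) = (ys.length : Int) + 1 := by
        simp
      rw [hlen, PySem.List.pyRange_one_succ_right (by positivity),
          pv_enumerate_append_singleton]
      simp only [List.filterMap_append]
      have hcong : List.filterMap (fun i => g (i, PySem.List.pyGetD (ys ++ [x]) i 0))
          (PySem.List.pyRange 0 (ys.length : Int) 1)
          = List.filterMap (fun i => g (i, PySem.List.pyGetD ys i 0))
              (PySem.List.pyRange 0 (ys.length : Int) 1) := by
        refine List.filterMap_congr ?_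
        intro i hi
        rcases (PySem.List.mem_pyRange_one).1 hi with ⟨h0, h1⟩
        rw [pv_pyGetD_append ys x i h0 h1]
      rw [hcong, ih]
      simp only [List.filterMap_cons, List.filterMap_nil, pv_pyGetD_append_length, zero_add]

-- First-minimum of a cons pair list: fold the head into the second element.
lemma pv_min?_cons2 (a b : Int × Int) (l : List (Int × Int)) :
    PySem.List.min? (a :: b :: l) (fun t => t.1)
      = PySem.List.min? ((if b.1 < a.1 then b else a) :: l) (fun t => t.1) := by
  unfold PySem.List.min?
  simp only [List.foldl_cons]
  split_ifs <;> rfl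

-- Once A holds a candidate best (bv, bi) with bv < m, the rest of its loop is
-- exactly the first-minimum of that best followed by the remaining candidates.
lemma pv_core2 (t : List (Int × Int)) :
    ∀ (bv bi m : Int), bv < m →
    PySem.List.min? ((bv, bi) :: t.filterMap (pvCand m)) (fun t => t.1)
      = some (t.foldl pvStepA (bv, bi)) := by
  induction t with
  | nil => intro bv bi m h; rfl
  | cons p t ih =>
      intro bv bi m h
      rw [List.foldl_cons, List.filterMap_cons]
      by_cases hc : p.2 ≠ 0 ∧ p.2 < m
      · rw [show pvCand m p = some (p.2, p.1) from by simp [pvCand, hc],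
            show pvStepA (bv, bi) p = if p.2 < bv then (p.2, p.1) else (bv, bi) from by
              simp [pvStepA, hc.1],
            pv_min?_cons2]
        by_cases hlt : p.2 < bv
        · simp only [if_pos hlt]
          exact ih p.2 p.1 m hc.2
        · simp only [if_neg hlt]
          exact ih bv bi m h
      · rw [show pvCand m p = none from by simp [pvCand, hc],
            show pvStepA (bv, bi) p = (bv, bi) from by
              unfold pvStepA
              by_cases h0 : p.2 ≠ 0
              · have hnm : ¬ (p.2 < m) := fun hm => hc ⟨h0, hm⟩
                have : ¬ p.2 < bv := by omega
                simp [h0, this]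
              · simp [h0]]
        exact ih bv bi m h

-- A's fold over (index, value) pairs computes B's select-then-min.
lemma pv_core (l : List (Int × Int)) :
    ∀ (m idx : Int),
    (l.foldl pvStepA (m, idx)).2
      = (match PySem.List.min? (l.filterMap (pvCand m)) (fun t => t.1) with
         | none => idx
         | some t => t.2) := by
  induction l with
  | nil => intro m idx; rfl
  | cons p t ih =>
      intro m idx
      rw [List.foldl_cons, List.filterMap_cons]
      by_cases hc : p.2 ≠ 0 ∧ p.2 < m
      · rw [show pvCand m p = some (p.2, p.1) from by simp [pvCand, hc],
            show pvStepA (m, idx) p = (p.2, p.1) from by simp [pvStepA, hc.1, hc.2],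
            pv_core2 t p.2 p.1 m hc.2]
      · rw [show pvCand m p = none from by simp [pvCand, hc],
            show pvStepA (m, idx) p = (m, idx) from by
              unfold pvStepA
              by_cases h0 : p.2 ≠ 0
              · have hnm : ¬ (p.2 < m) := fun hm => hc ⟨h0, hm⟩
                simp [h0, hnm]
              · simp [h0]]
        exact ih m idx

-- ===== VERDICT (by name: the statement is the Claim_ definition above) =====
theorem vratIndexNejmensihoRozdilZRadku_spec : Claim_equal_vratIndexNejmensihoRozdilZRadku := by
  intro radekRozdilu max _
  show ((PySem.List.pyRange 0 (radekRozdilu.length : Int) 1).foldl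
          (fun st i => pvStepA st (i, PySem.List.pyGetD radekRozdilu i 0)) (max, 0)).2
      = (match PySem.List.min?
            ((PySem.List.pyRange 0 (radekRozdilu.length : Int) 1).filterMap
              (fun i => pvCand max (i, PySem.List.pyGetD radekRozdilu i 0)))
            (fun t => t.1) with
         | none => 0
         | some t => t.2)
  rw [pv_foldl_pyRange_enumerate radekRozdilu pvStepA (max, 0),
      pv_filterMap_pyRange_enumerate radekRozdilu (pvCand max),
      pv_core]
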